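-- pv_equiv track=rewrite | github.com/cvamateur/DSCollection | src/DSCollection/core/reorganize.py | _get_partition_by_ne
-- ===== SOURCE A (Python) =====
-- def _get_partition_by_ne(ne: int, total: int):
--     parts = []
--     start = 0
--     while start + ne < total:
--         parts.append(ne)
--         start += ne
--     remain = total % ne
--     if remain and parts and remain <= ne // 5:
--         a = remain // len(parts)
--         parts = [x + a for x in parts]
--         parts[-1] += remain % len(parts)
--     else:
--         parts.append(remain)
--     return parts
-- ===== SOURCE B (Python) =====
-- def _get_partition_by_ne(ne: int, total: int):
--     # Closed-form chunk count instead of the counting loop (requires ne >= 1).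
--     q, r = divmod(total, ne)
--     k = max(q - (0 if r else 1), 0)
--     if r and k and r <= ne // 5:
--         a, b = divmod(r, k)
--         return [ne + a] * (k - 1) + [ne + a + b]
--     return [ne] * k + [r]
-- ===== Notes on version B (the rewrite author's own statement) =====
-- stated objective: idiomatic
-- what changed: The counting while-loop is replaced by a closed-form chunk count k = max(total//ne - (0 if total%ne else 1), 0) from divmod, and the remainder-distribution branch builds its list directly as [ne+a]*(k-1)+[ne+a+b] instead of mapping and mutating the last element.
-- outside the precondition, e.g. on _get_partition_by_ne(0, 5): A does not finish within the time limit, B raises ZeroDivisionError; on _get_partition_by_ne(-3, 2): A does not finish within the time limit, B returns [-1]; on _get_partition_by_ne(-3, -5): A returns [-2], B returns [-5]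
import Mathlib
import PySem

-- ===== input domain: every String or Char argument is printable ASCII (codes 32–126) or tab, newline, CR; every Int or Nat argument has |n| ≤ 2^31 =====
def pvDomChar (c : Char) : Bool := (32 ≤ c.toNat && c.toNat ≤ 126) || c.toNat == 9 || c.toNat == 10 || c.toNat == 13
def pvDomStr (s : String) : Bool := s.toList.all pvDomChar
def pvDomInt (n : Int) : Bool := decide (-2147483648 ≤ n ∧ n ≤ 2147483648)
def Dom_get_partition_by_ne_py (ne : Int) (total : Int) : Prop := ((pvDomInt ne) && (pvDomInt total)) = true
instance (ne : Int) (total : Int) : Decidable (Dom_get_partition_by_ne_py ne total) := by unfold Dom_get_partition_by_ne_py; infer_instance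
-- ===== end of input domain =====

-- B replaces A's counting while-loop by a closed-form chunk count from divmod and builds the
-- distributed-remainder list directly (idiomatic; return-value equivalence proved on ne ≥ 1).

-- ===== PORT A =====
-- while start + ne < total: parts.append(ne); start += ne
-- (fuel only makes the loop total in Lean; for ne ≥ 1 the loop runs at most total.toNat times)
def pyA_loop (ne total start : Int) (fuel : Nat) : List Int :=
  match fuel with
  | 0 => []
  | Nat.succ f => if start + ne < total then ne :: pyA_loop ne total (start + ne) f else []

def get_partition_by_ne_py (ne : Int) (total : Int) : List Int :=
  let parts := pyA_loop ne total 0 (total.toNat + 1)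
  let remain := PySem.Int.mod total ne
  if remain ≠ 0 ∧ parts ≠ [] ∧ remain ≤ PySem.Int.floordiv ne 5 then
    let a := PySem.Int.floordiv remain (parts.length : Int)
    let parts2 := parts.map (fun x => x + a)
    -- parts[-1] += remain % len(parts)  (parts is nonempty in this branch, so getLast! is exact)
    parts2.dropLast ++ [parts2.getLast! + PySem.Int.mod remain (parts.length : Int)]
  else
    parts ++ [remain]

-- ===== PORT B =====
def get_partition_by_ne_py_alt (ne : Int) (total : Int) : List Int :=
  let q := PySem.Int.floordiv total ne
  let r := PySem.Int.mod total ne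
  let k := max (q - (if r = 0 then 1 else 0)) 0
  if r ≠ 0 ∧ k ≠ 0 ∧ r ≤ PySem.Int.floordiv ne 5 then
    let a := PySem.Int.floordiv r k
    let b := PySem.Int.mod r k
    List.replicate (k.toNat - 1) (ne + a) ++ [ne + a + b]
  else
    List.replicate k.toNat ne ++ [r]

-- ===== PRECONDITION & SPEC =====
-- Pre_ restricts to the natural domain of a positive chunk size: for ne = 0 A diverges (or would
-- divide by zero), for ne < 0 A diverges whenever total > ne, and on the remaining degenerate
-- inputs (ne < 0, total ≤ ne) A's value [total % ne] is an accident of a chunk size no caller uses.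
def Pre_get_partition_by_ne_py (ne : Int) (total : Int) : Prop := 1 ≤ ne
instance (ne : Int) (total : Int) : Decidable (Pre_get_partition_by_ne_py ne total) := by unfold Pre_get_partition_by_ne_py; infer_instance

def pvWitness_get_partition_by_ne_py : Int × Int := (3, 10)

def Spec_get_partition_by_ne_py (ne : Int) (total : Int) (out : List Int) : Prop := out = get_partition_by_ne_py_alt ne total
instance (ne : Int) (total : Int) (out : List Int) : Decidable (Spec_get_partition_by_ne_py ne total out) := by unfold Spec_get_partition_by_ne_py; infer_instance

-- ===== CLAIM (what is proved, stated in full; the proofs are below) =====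
def Claim_equal_get_partition_by_ne_py : Prop := ∀ (ne : Int) (total : Int), Dom_get_partition_by_ne_py ne total → Pre_get_partition_by_ne_py ne total → Spec_get_partition_by_ne_py ne total (get_partition_by_ne_py ne total)

-- ===== LEMMAS AND PROOFS =====

-- A's while-loop appends ne exactly c times, where c is pinned by the two bracket inequalities.
lemma pyA_loop_eq_replicate (ne total : Int) (hne : 1 ≤ ne) :
    ∀ (c : Nat) (start : Int) (fuel : Nat), c ≤ fuel →
      total ≤ start + ((c : Int) + 1) * ne → (c = 0 ∨ start + (c : Int) * ne < total) →
      pyA_loop ne total start fuel = List.replicate c ne := by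
  intro c
  induction c with
  | zero =>
    intro start fuel _ h1 _
    cases fuel with
    | zero => rfl
    | succ f =>
      have hcond : ¬ (start + ne < total) := by push_cast at h1; omega
      simp [pyA_loop, hcond]
  | succ c ih =>
    intro start fuel hf h1 h2
    cases fuel with
    | zero => omega
    | succ f =>
      have hc : start + ((c : Int) + 1) * ne < total := by
        rcases h2 with h | h
        · omega
        · push_cast at h ⊢; linarith
      have hcc : (0 : Int) ≤ (c : Int) * ne := mul_nonneg (Int.natCast_nonneg c) (by omega)
      have hexp : ((c : Int) + 1) * ne = (c : Int) * ne + ne := by ring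
      have hcond : start + ne < total := by linarith
      have := ih (start + ne) f (by omega)
        (by push_cast at h1 ⊢; linarith)
        (by right; push_cast; linarith)
      simp [pyA_loop, hcond, this, List.replicate_succ]

theorem pv_main (ne total : Int) (hne : Pre_get_partition_by_ne_py ne total) : Spec_get_partition_by_ne_py ne total (get_partition_by_ne_py ne total) := by
  unfold Spec_get_partition_by_ne_py get_partition_by_ne_py get_partition_by_ne_py_alt
  have hne' : (0 : Int) < ne := by exact_mod_cast hne
  set q := PySem.Int.floordiv total ne with hq
  set r := PySem.Int.mod total ne with hr
  have hqr : q * ne + r = total := PySem.Int.floordiv_mul_add_mod total ne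
  have hr0 : 0 ≤ r := PySem.Int.mod_nonneg total hne'
  have hrlt : r < ne := PySem.Int.mod_lt total hne'
  set k := max (q - (if r = 0 then 1 else 0)) 0 with hk
  have hk0 : 0 ≤ k := le_max_right _ _
  have hkc : ((k.toNat : Int)) = k := Int.toNat_of_nonneg hk0
  -- facts about q * ne needed linearly
  have hT : q * ne = total - r := by omega
  have hqle : 0 ≤ q → q ≤ q * ne := fun h => le_mul_of_one_le_right h hne
  have hqnp : q ≤ 0 → q * ne ≤ 0 := fun h => mul_nonpos_of_nonpos_of_nonneg h (by omega)
  -- the loop runs exactly k.toNat times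
  have hloop : pyA_loop ne total 0 (total.toNat + 1) = List.replicate k.toNat ne := by
    apply pyA_loop_eq_replicate ne total hne
    · -- fuel bound
      by_cases hq0 : q ≤ 0
      · have := hqnp hq0; split_ifs at hk <;> omega
      · have h1 : 0 ≤ q := by omega
        have := hqle h1
        split_ifs at hk <;> omega
    · -- total ≤ 0 + (k + 1) * ne
      rw [hkc]
      by_cases hrz : r = 0
      · simp only [hrz] at hk
        by_cases hq2 : q ≤ 1
        · have hk0' : k = 0 := by omega
          have hmul : q * ne ≤ 1 * ne := mul_le_mul_of_nonneg_right hq2 (by omega)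
          have hr' : r = 0 := hrz
          rw [hk0']; linarith
        · have hk' : k = q - 1 := by omega
          have hr' : r = 0 := hrz
          rw [hk']; linarith
      · simp only [hrz] at hk
        by_cases hq0 : q ≤ 0
        · have hk0' : k = 0 := by have := hqnp hq0; omega
          rw [hk0']; linarith [hqnp hq0]
        · have hk' : k = q := by omega
          rw [hk']; linarith
    · -- k = 0 ∨ k * ne < total
      by_cases hkz : k = 0
      · left; omega
      · right
        rw [hkc]
        by_cases hrz : r = 0
        · simp only [hrz] at hk
          have hk' : k = q - 1 := by
            by_cases hq2 : q ≤ 1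
            · exfalso; apply hkz; omega
            · omega
          have hr' : r = 0 := hrz
          rw [hk']; linarith
        · simp only [hrz] at hk
          have hk' : k = q := by
            by_cases hq0 : q ≤ 0
            · exfalso; apply hkz; have := hqnp hq0; omega
            · omega
          have hrpos : 0 < r := lt_of_le_of_ne hr0 (Ne.symm hrz)
          rw [hk']; linarith [hT]
  rw [hloop]
  have hlen : ((List.replicate k.toNat ne).length : Int) = k := by
    simp [List.length_replicate, hkc]
  have hnonempty : (List.replicate k.toNat ne ≠ []) ↔ k ≠ 0 := by
    simp [List.replicate_eq_nil_iff]; omega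
  by_cases hcond : r ≠ 0 ∧ k ≠ 0 ∧ r ≤ PySem.Int.floordiv ne 5
  · rw [if_pos (by exact ⟨hcond.1, hnonempty.mpr hcond.2.1, hcond.2.2⟩), if_pos hcond]
    rw [hlen]
    obtain ⟨m, hm⟩ : ∃ m, k.toNat = m + 1 := by
      refine ⟨k.toNat - 1, ?_⟩
      have : k ≠ 0 := hcond.2.1
      omega
    rw [hm]
    simp only [List.replicate_succ' (n := m), Nat.add_sub_cancel, ← hk]
    simp only [List.map_append, List.map_replicate, List.map_cons, List.map_nil, ne_eq,
      List.cons_ne_self, not_false_eq_true, List.dropLast_append_of_ne_nil,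
      List.dropLast_singleton, List.append_nil, List.getLast!_eq_getLast?_getD,
      List.getLast?_append, List.getLast?_singleton, Option.some_or, Int.default_eq_zero,
      Option.getD_some]
  · rw [if_neg (by
        intro h
        exact hcond ⟨h.1, hnonempty.mp h.2.1, h.2.2⟩), if_neg hcond]

-- ===== VERDICT (by name: the statement is the Claim_ definition above) =====
theorem get_partition_by_ne_py_spec : Claim_equal_get_partition_by_ne_py :=
  fun ne total _ hne => pv_main ne total hne
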